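-- pv_equiv track=rewrite | github.com/Open-Research-Development-Laboratories/ordl-phetamines | fleet_api/fleet_api/dispatch.py | _order_issues
-- ===== SOURCE A (Python) =====
-- def _order_issues(positions: dict[str, int], names: tuple[str, ...], mode: str) -> list[str]:
--     issues: list[str] = []
--     missing = [n for n in names if positions[n] == -1]
--     if missing:
--         issues.append(f"missing {mode} sections: {', '.join(missing)}")
--         return issues
--     ordered_values = [positions[n] for n in names]
--     if ordered_values != sorted(ordered_values):
--         issues.append("sections out of order; expected: Summary, Risks, Action List, Open Questions")
--     return issues
-- ===== SOURCE B (Python) =====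
-- def _order_issues(positions: dict[str, int], names: tuple[str, ...], mode: str) -> list[str]:
--     missing = [n for n in names if positions[n] == -1]
--     if missing:
--         return [f"missing {mode} sections: {', '.join(missing)}"]
--     prev = None
--     for n in names:
--         v = positions[n]
--         if prev is not None and v < prev:
--             return ["sections out of order; expected: Summary, Risks, Action List, Open Questions"]
--         prev = v
--     return []
-- ===== Notes on version B (the rewrite author's own statement) =====
-- stated objective: alternative
-- what changed: The order check is a single linear scan that compares each position to the previous one and stops at the first inversion, instead of building the values list and comparing it against a sorted copy.
import Mathlib
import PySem

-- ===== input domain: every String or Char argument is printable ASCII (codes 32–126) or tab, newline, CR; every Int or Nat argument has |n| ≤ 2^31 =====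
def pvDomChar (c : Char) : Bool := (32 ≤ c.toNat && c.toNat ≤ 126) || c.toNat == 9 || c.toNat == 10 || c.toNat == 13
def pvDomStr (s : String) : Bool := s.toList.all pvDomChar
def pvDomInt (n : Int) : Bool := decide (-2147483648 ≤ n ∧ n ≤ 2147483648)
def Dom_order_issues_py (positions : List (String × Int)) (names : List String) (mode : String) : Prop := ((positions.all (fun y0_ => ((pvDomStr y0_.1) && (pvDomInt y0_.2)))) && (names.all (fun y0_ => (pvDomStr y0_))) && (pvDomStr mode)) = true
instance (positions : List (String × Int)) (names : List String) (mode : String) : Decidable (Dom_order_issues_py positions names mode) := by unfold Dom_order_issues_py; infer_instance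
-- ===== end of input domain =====

-- B replaces A's sort-then-compare order check by a single linear scan that stops at the first inversion.

-- ===== PORT A =====
-- literal port of A: filter the missing names, early return; else compare the values list with its sorted copy
def order_issues_py (positions : List (String × Int)) (names : List String) (mode : String) : List String :=
  let d := PySem.Dict.mk positions
  let missing := names.filter (fun n => d.getD n 0 == -1)
  if missing ≠ [] then
    ["missing " ++ mode ++ " sections: " ++ PySem.Str.join ", " missing]
  else
    let ordered_values := names.map (fun n => d.getD n 0)
    if ordered_values ≠ PySem.List.sorted ordered_values (fun x => x) false then
      ["sections out of order; expected: Summary, Risks, Action List, Open Questions"]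
    else []

-- ===== PORT B =====
-- the linear scan of Source B: prev carries the previous position (None before the first name)
def orderScan (d : PySem.Dict String Int) (names : List String) (prev : Option Int) : List String :=
  match names with
  | [] => []
  | n :: rest =>
    let v := d.getD n 0
    match prev with
    | some p =>
      if v < p then
        ["sections out of order; expected: Summary, Risks, Action List, Open Questions"]
      else orderScan d rest (some v)
    | none => orderScan d rest (some v)

def order_issues_py_alt (positions : List (String × Int)) (names : List String) (mode : String) : List String :=
  let d := PySem.Dict.mk positions
  let missing := names.filter (fun n => d.getD n 0 == -1)
  if missing ≠ [] then
    ["missing " ++ mode ++ " sections: " ++ PySem.Str.join ", " missing]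
  else
    orderScan d names none

-- ===== PRECONDITION & SPEC =====
-- Pre_: every name must be a key of positions; Python raises KeyError on positions[n] otherwise.
def Pre_order_issues_py (positions : List (String × Int)) (names : List String) (mode : String) : Prop :=
  ∀ n ∈ names, n ∈ positions.map Prod.fst

instance (positions : List (String × Int)) (names : List String) (mode : String) : Decidable (Pre_order_issues_py positions names mode) := by unfold Pre_order_issues_py; infer_instance

def pvWitness_order_issues_py : (List (String × Int)) × List String × String :=
  ([("Summary", 0), ("Risks", 2)], ["Summary", "Risks"], "weekly")

def Spec_order_issues_py (positions : List (String × Int)) (names : List String) (mode : String) (out : List String) : Prop := out = order_issues_py_alt positions names mode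
instance (positions : List (String × Int)) (names : List String) (mode : String) (out : List String) : Decidable (Spec_order_issues_py positions names mode out) := by unfold Spec_order_issues_py; infer_instance

-- ===== CLAIM (what is proved, stated in full; the proofs are below) =====
def Claim_equal_order_issues_py : Prop := ∀ (positions : List (String × Int)) (names : List String) (mode : String), Dom_order_issues_py positions names mode → Pre_order_issues_py positions names mode → Spec_order_issues_py positions names mode (order_issues_py positions names mode)

-- ===== LEMMAS AND PROOFS =====

-- proof-only helper: Bool check that p ≤ xs[0] ≤ xs[1] ≤ …
def leChainB (p : Int) (xs : List Int) : Bool :=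
  match xs with
  | [] => true
  | x :: rest => p ≤ x && leChainB x rest

theorem leChainB_iff_pairwise (xs : List Int) (p : Int) :
    leChainB p xs = true ↔ (p :: xs).Pairwise (fun a b => a ≤ b) := by
  induction xs generalizing p with
  | nil => simp [leChainB]
  | cons x rest ih =>
    simp only [leChainB, Bool.and_eq_true, decide_eq_true_eq, ih, List.pairwise_cons,
      List.mem_cons]
    constructor
    · rintro ⟨hpx, hall, hrest⟩
      refine ⟨fun y hy => ?_, hall, hrest⟩
      rcases hy with rfl | hy
      · exact hpx
      · exact le_trans hpx (hall y hy)
    · rintro ⟨hp, hall, hrest⟩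
      exact ⟨hp x (Or.inl rfl), hall, hrest⟩

-- the head-split form of the chain check, as it appears after unfolding the scan
theorem headChain_iff_pairwise (xs : List Int) :
    (match xs with
     | [] => true
     | v :: rest => leChainB v rest) = true ↔ xs.Pairwise (fun a b => a ≤ b) := by
  cases xs with
  | nil => simp
  | cons v rest => simpa using leChainB_iff_pairwise rest v

-- the scan with a previous value p returns [] iff p followed by the values is a ≤-chain
theorem orderScan_some (d : PySem.Dict String Int) (names : List String) (p : Int) :
    orderScan d names (some p) =
      if leChainB p (names.map (fun n => d.getD n 0)) then [] else
        ["sections out of order; expected: Summary, Risks, Action List, Open Questions"] := by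
  induction names generalizing p with
  | nil => simp [orderScan, leChainB]
  | cons n rest ih =>
    simp only [orderScan, List.map_cons, leChainB, ih]
    by_cases h : d.getD n 0 < p
    · simp [h, not_le.mpr h]
    · simp [h, not_lt.mp h]

theorem orderScan_none (d : PySem.Dict String Int) (names : List String) :
    orderScan d names none =
      if (match names.map (fun n => d.getD n 0) with
          | [] => true
          | v :: rest => leChainB v rest) then [] else
        ["sections out of order; expected: Summary, Risks, Action List, Open Questions"] := by
  cases names with
  | nil => simp [orderScan]
  | cons n rest => simp [orderScan, orderScan_some]

-- a list equals its sorted copy iff it is already ≤-pairwise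
theorem eq_sorted_iff_pairwise (xs : List Int) :
    xs = PySem.List.sorted xs (fun x => x) false ↔ xs.Pairwise (fun a b => a ≤ b) := by
  constructor
  · intro h
    have := PySem.List.sorted_pairwise (xs := xs) (key := fun x => x)
    rw [← h] at this
    exact this
  · intro h
    exact (PySem.List.sorted_eq_self_of_pairwise xs (fun x => x) h).symm

-- ===== VERDICT (by name: the statement is the Claim_ definition above) =====
theorem order_issues_py_spec : Claim_equal_order_issues_py := by
  intro positions names mode _ _
  unfold Spec_order_issues_py order_issues_py order_issues_py_alt
  by_cases hm : names.filter (fun n => (PySem.Dict.mk positions).getD n 0 == -1) ≠ []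
  · simp [hm]
  · simp only [hm, if_false]
    rw [orderScan_none]
    by_cases hs : names.map (fun n => (PySem.Dict.mk positions).getD n 0) =
        PySem.List.sorted (names.map (fun n => (PySem.Dict.mk positions).getD n 0)) (fun x => x) false
    · rw [if_neg (fun h => h hs),
        if_pos ((headChain_iff_pairwise _).mpr ((eq_sorted_iff_pairwise _).mp hs))]
    · rw [if_pos hs,
        if_neg (fun hc => hs ((eq_sorted_iff_pairwise _).mpr ((headChain_iff_pairwise _).mp hc)))]
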